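-- pv_equiv track=rewrite | github.com/baeksangha/python_sw | 4130_특이한자석/source.py | solution
-- ===== SOURCE A (Python) =====
-- def rotate(magnet, flag):
--     # clockwise
--     if flag == 1:
--         return [magnet[-1]] + magnet[:-1]
--     # counter clockwise
--     else:
--         return magnet[1:] + [magnet[0]]
--
-- def solution(k, magnets, commands):
--     answer = 0
--     for cmd in commands:
--         target, flag = cmd[0]-1, cmd[1]
--         l_idx = r_idx = target
--         l_flag = flag * -1
--         while l_idx > 0 and magnets[l_idx][6] != magnets[l_idx-1][2]:
--             l_idx -= 1
--         while r_idx < 3 and magnets[r_idx][2] != magnets[r_idx+1][6]: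
--             r_idx += 1
--         for i in range(target-1, l_idx-1, -1):
--             magnets[i] = rotate(magnets[i], l_flag)
--             l_flag *= -1
--         for i in range(target, r_idx+1):
--             magnets[i] = rotate(magnets[i], flag)
--             flag *= -1
--
--     for i in range(4):
--         if magnets[i][0] == 1:
--             answer += (1 << i)
--     return answer
-- ===== SOURCE B (Python) =====
-- def rotate(magnet, flag):
--     # clockwise
--     if flag == 1:
--         return [magnet[-1]] + magnet[:-1]
--     # counter clockwise
--     return magnet[1:] + [magnet[0]]
--
--
-- def _spread_left(magnets, dirs, i):
--     # propagate rotation to the left neighbour while the touching poles differ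
--     if i >= 1 and magnets[i-1][2] != magnets[i][6]:
--         dirs[i-1] = -dirs[i]
--         _spread_left(magnets, dirs, i-1)
--
--
-- def _spread_right(magnets, dirs, i):
--     # propagate rotation to the right neighbour while the touching poles differ
--     if i <= 2 and magnets[i][2] != magnets[i+1][6]:
--         dirs[i+1] = -dirs[i]
--         _spread_right(magnets, dirs, i+1)
--
--
-- def solution(k, magnets, commands):
--     for cmd in commands:
--         target, flag = cmd[0] - 1, cmd[1]
--         dirs = [None, None, None, None]
--         dirs[target] = flag
--         _spread_left(magnets, dirs, target)
--         _spread_right(magnets, dirs, target)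
--         for i in range(4):
--             if dirs[i] is not None:
--                 magnets[i] = rotate(magnets[i], dirs[i])
--     return sum(1 << i for i in range(4) if magnets[i][0] == 1)
-- ===== Notes on version B (the rewrite author's own statement) =====
-- stated objective: alternative
-- what changed: A finds left/right chain boundary indices with two while-scans and then runs two separate alternating-sign in-place rotation loops; B instead fills a length-4 direction array by recursive left/right propagation from the target and applies all rotations in one pass over the four magnets.
import Mathlib
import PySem

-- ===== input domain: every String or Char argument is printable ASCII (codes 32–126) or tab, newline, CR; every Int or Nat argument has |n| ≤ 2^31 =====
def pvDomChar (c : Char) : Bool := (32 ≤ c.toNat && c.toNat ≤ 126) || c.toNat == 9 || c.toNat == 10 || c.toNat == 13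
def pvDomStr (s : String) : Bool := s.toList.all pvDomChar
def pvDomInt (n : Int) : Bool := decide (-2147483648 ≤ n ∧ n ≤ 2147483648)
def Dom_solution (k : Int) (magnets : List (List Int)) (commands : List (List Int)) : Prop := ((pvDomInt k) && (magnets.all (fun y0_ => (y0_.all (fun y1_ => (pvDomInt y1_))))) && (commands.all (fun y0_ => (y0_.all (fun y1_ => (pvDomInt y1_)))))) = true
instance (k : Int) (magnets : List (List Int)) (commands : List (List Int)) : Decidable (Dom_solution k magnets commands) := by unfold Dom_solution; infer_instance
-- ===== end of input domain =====

-- B replaces A's two boundary scans + two alternating in-place rotation loops by a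
-- length-4 direction array filled by recursive left/right propagation and ONE rotation pass
-- (objective: alternative decomposition, same cost). Both A and B mutate `magnets` in place
-- in Python; the equivalence proved here is about the RETURN value only.

-- shared index helpers (transliterations of Python indexing; `none` = IndexError, excluded by Pre_)
def pyRow (mg : List (List Int)) (i : Int) : List Int := (PySem.List.pyGet? mg i).getD []
def pyInt (m : List Int) (i : Int) : Int := (PySem.List.pyGet? m i).getD 0
-- Python `magnets[i] = v` (Pre_ keeps 0 ≤ i < len; negative-index assignment is outside Pre_)
def pySet (mg : List (List Int)) (i : Int) (v : List Int) : List (List Int) :=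
  if 0 ≤ i then mg.set i.toNat v else mg
-- rotate(magnet, flag): both Source A and Source B carry this helper verbatim
def pyRotate (m : List Int) (flag : Int) : List Int :=
  if flag = 1 then (PySem.List.pyGet? m (-1)).getD 0 :: PySem.List.slice m none (some (-1))
  else PySem.List.slice m (some 1) none ++ [(PySem.List.pyGet? m 0).getD 0]

-- ===== PORT A =====
-- while l_idx > 0 and magnets[l_idx][6] != magnets[l_idx-1][2]: l_idx -= 1
def scanLA (mg : List (List Int)) (l : Int) : Int :=
  if h : 0 < l ∧ pyInt (pyRow mg l) 6 ≠ pyInt (pyRow mg (l-1)) 2 then scanLA mg (l-1) else l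
termination_by l.toNat
decreasing_by omega
-- while r_idx < 3 and magnets[r_idx][2] != magnets[r_idx+1][6]: r_idx += 1
def scanRA (mg : List (List Int)) (r : Int) : Int :=
  if h : r < 3 ∧ pyInt (pyRow mg r) 2 ≠ pyInt (pyRow mg (r+1)) 6 then scanRA mg (r+1) else r
termination_by (3 - r).toNat
decreasing_by omega
-- for i in range(start, stop, -1): magnets[i] = rotate(magnets[i], fl); fl *= -1
def rotLoopLA (mg : List (List Int)) (fl : Int) (i stop : Int) : List (List Int) :=
  if h : stop < i then rotLoopLA (pySet mg i (pyRotate (pyRow mg i) fl)) (fl * -1) (i-1) stop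
  else mg
termination_by (i - stop).toNat
decreasing_by omega
-- for i in range(start, stop, 1): magnets[i] = rotate(magnets[i], fl); fl *= -1
def rotLoopRA (mg : List (List Int)) (fl : Int) (i stop : Int) : List (List Int) :=
  if h : i < stop then rotLoopRA (pySet mg i (pyRotate (pyRow mg i) fl)) (fl * -1) (i+1) stop
  else mg
termination_by (stop - i).toNat
decreasing_by omega

def stepA (mg : List (List Int)) (cmd : List Int) : List (List Int) :=
  let target := pyInt cmd 0 - 1
  let flag := pyInt cmd 1
  let lidx := scanLA mg target
  let ridx := scanRA mg target
  let mg1 := rotLoopLA mg (flag * -1) (target - 1) (lidx - 1)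
  rotLoopRA mg1 flag target (ridx + 1)

-- for i in range(4): if magnets[i][0] == 1: answer += (1 << i)   (1 << i ported as 2^i, exact for i ≥ 0)
def answerA (mg : List (List Int)) : Int :=
  (PySem.List.pyRange 0 4 1).foldl
    (fun acc i => if pyInt (pyRow mg i) 0 = 1 then acc + 2 ^ i.toNat else acc) 0

def solution (k : Int) (magnets : List (List Int)) (commands : List (List Int)) : Int :=
  answerA (commands.foldl stepA magnets)

-- ===== PORT B =====
def dGet (dirs : List (Option Int)) (i : Int) : Option Int := (PySem.List.pyGet? dirs i).getD none
def dSet (dirs : List (Option Int)) (i : Int) (v : Option Int) : List (Option Int) :=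
  if 0 ≤ i then dirs.set i.toNat v else dirs
-- _spread_left; `-dirs[i]` is an int whenever read (set before), `.getD 0` only totalizes
def spreadL (mg : List (List Int)) (dirs : List (Option Int)) (i : Int) : List (Option Int) :=
  if h : 1 ≤ i ∧ pyInt (pyRow mg (i-1)) 2 ≠ pyInt (pyRow mg i) 6 then
    spreadL mg (dSet dirs (i-1) (some (-((dGet dirs i).getD 0)))) (i-1)
  else dirs
termination_by i.toNat
decreasing_by omega
-- _spread_right
def spreadR (mg : List (List Int)) (dirs : List (Option Int)) (i : Int) : List (Option Int) :=
  if h : i ≤ 2 ∧ pyInt (pyRow mg i) 2 ≠ pyInt (pyRow mg (i+1)) 6 then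
    spreadR mg (dSet dirs (i+1) (some (-((dGet dirs i).getD 0)))) (i+1)
  else dirs
termination_by (3 - i).toNat
decreasing_by omega

def stepB (mg : List (List Int)) (cmd : List Int) : List (List Int) :=
  let target := pyInt cmd 0 - 1
  let flag := pyInt cmd 1
  let dirs := spreadR mg (spreadL mg (dSet (List.replicate 4 none) target (some flag)) target) target
  (PySem.List.pyRange 0 4 1).foldl
    (fun m i => match dGet dirs i with
      | some f => pySet m i (pyRotate (pyRow m i) f)
      | none => m) mg

-- sum(1 << i for i in range(4) if magnets[i][0] == 1)
def answerB (mg : List (List Int)) : Int :=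
  (((PySem.List.pyRange 0 4 1).filter (fun i => pyInt (pyRow mg i) 0 == 1)).map
    (fun i => (2:Int) ^ i.toNat)).sum

def solution_alt (k : Int) (magnets : List (List Int)) (commands : List (List Int)) : Int :=
  answerB (commands.foldl stepB magnets)

-- ===== PRECONDITION & SPEC =====
-- Pre_ excludes inputs where A raises (fewer than 4 magnets, an empty row, a command shorter
-- than 2, and — when any command runs — a row among the first four without pole index 6) and
-- commands whose first entry is outside 1..4: for cmd[0] in -3..0 A still returns, but only
-- through Python's negative-index wraparound, an accident of A's implementation (B wraps
-- differently there); with commands nonempty, first-four rows of length 1..6 that no command's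
-- contact chain actually reads are excluded too, even though A returns on them.
def Pre_solution (k : Int) (magnets : List (List Int)) (commands : List (List Int)) : Prop :=
  4 ≤ magnets.length ∧ (∀ m ∈ magnets.take 4, 1 ≤ m.length) ∧
  (∀ c ∈ commands, 2 ≤ c.length ∧ 1 ≤ c.headI ∧ c.headI ≤ 4) ∧
  (commands ≠ [] → ∀ m ∈ magnets.take 4, 7 ≤ m.length)
instance (k : Int) (magnets : List (List Int)) (commands : List (List Int)) : Decidable (Pre_solution k magnets commands) := by unfold Pre_solution; infer_instance

def pvWitness_solution : Int × List (List Int) × List (List Int) :=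
  (4, [[1,0,0,0,0,0,1,0],[0,1,0,0,0,0,0,1],[1,0,1,0,0,0,0,0],[0,0,0,1,0,0,0,1]], [[1,1],[4,-1],[2,1]])

def Spec_solution (k : Int) (magnets : List (List Int)) (commands : List (List Int)) (out : Int) : Prop := out = solution_alt k magnets commands
instance (k : Int) (magnets : List (List Int)) (commands : List (List Int)) (out : Int) : Decidable (Spec_solution k magnets commands out) := by unfold Spec_solution; infer_instance

-- ===== CLAIM (what is proved, stated in full; the proofs are below) =====
def Claim_equal_solution : Prop := ∀ (k : Int) (magnets : List (List Int)) (commands : List (List Int)), Dom_solution k magnets commands → Pre_solution k magnets commands → Spec_solution k magnets commands (solution k magnets commands)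

-- ===== LEMMAS AND PROOFS =====

lemma gg1 {α : Type} (x y : α) (r : List α) : PySem.List.pyGet? (x::y::r) (1:Int) = some y := by
  simp
lemma gg2 {α : Type} (x y z : α) (r : List α) : PySem.List.pyGet? (x::y::z::r) (2:Int) = some z := by
  have h := PySem.List.pyGet?_natCast (xs := x::y::z::r) (n := 2); norm_num at h; simpa using h
lemma gg3 {α : Type} (x y z w : α) (r : List α) : PySem.List.pyGet? (x::y::z::w::r) (3:Int) = some w := by
  have h := PySem.List.pyGet?_natCast (xs := x::y::z::w::r) (n := 3); norm_num at h; simpa using h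
lemma row0 (x y z w : List Int) (r : List (List Int)) : pyRow (x::y::z::w::r) 0 = x := by simp [pyRow]
lemma row1 (x y z w : List Int) (r : List (List Int)) : pyRow (x::y::z::w::r) 1 = y := by simp [pyRow, gg1]
lemma row2 (x y z w : List Int) (r : List (List Int)) : pyRow (x::y::z::w::r) 2 = z := by simp [pyRow, gg2]
lemma row3 (x y z w : List Int) (r : List (List Int)) : pyRow (x::y::z::w::r) 3 = w := by simp [pyRow, gg3]
lemma cmd0 (x : Int) (r : List Int) : pyInt (x::r) 0 = x := by simp [pyInt]
lemma cmd1 (x y : Int) (r : List Int) : pyInt (x::y::r) 1 = y := by simp [pyInt]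

set_option maxHeartbeats 4000000 in
set_option maxRecDepth 8000 in
lemma step_eq (a b c d : List Int) (rest : List (List Int)) (t f : Int) (cr : List Int)
    (h1 : 1 ≤ t) (h4 : t ≤ 4) :
    stepA (a::b::c::d::rest) (t::f::cr) = stepB (a::b::c::d::rest) (t::f::cr) ∧
    ∃ a' b' c' d', stepA (a::b::c::d::rest) (t::f::cr) = a'::b'::c'::d'::rest := by
  have hrange : PySem.List.pyRange 0 4 1 = [0,1,2,3] := by decide
  interval_cases t <;>
  by_cases C0 : pyInt a 2 = pyInt b 6 <;>
  by_cases C1 : pyInt b 2 = pyInt c 6 <;>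
  by_cases C2 : pyInt c 2 = pyInt d 6 <;>
  · first | have C0' := Ne.symm C0 | have C0' := C0
    first | have C1' := Ne.symm C1 | have C1' := C1
    first | have C2' := Ne.symm C2 | have C2' := C2
    refine ⟨?_, ?_⟩ <;>
    · simp [stepA, stepB, cmd0, cmd1, scanLA, scanRA, spreadL, spreadR,
        rotLoopLA, rotLoopRA, row0, row1, row2, row3,
        C0, C0', C1, C1', C2, C2', dGet, dSet, pySet, hrange, List.replicate]
      try exact ⟨_, _, _, _, rfl⟩

lemma ans_eq (mg : List (List Int)) : answerA mg = answerB mg := by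
  unfold answerA answerB
  rw [show PySem.List.pyRange 0 4 1 = [0,1,2,3] from by decide]
  simp only [List.foldl_cons, List.foldl_nil, List.filter]
  cases e0 : pyInt (pyRow mg 0) 0 == 1 <;>
  cases e1 : pyInt (pyRow mg 1) 0 == 1 <;>
  cases e2 : pyInt (pyRow mg 2) 0 == 1 <;>
  cases e3 : pyInt (pyRow mg 3) 0 == 1 <;>
    simp_all

lemma fold_eq (cmds : List (List Int)) : ∀ (a b c d : List Int) (rest : List (List Int)),
    (∀ c ∈ cmds, 2 ≤ c.length ∧ 1 ≤ c.headI ∧ c.headI ≤ 4) →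
    cmds.foldl stepA (a::b::c::d::rest) = cmds.foldl stepB (a::b::c::d::rest) ∧
    ∃ a' b' c' d', cmds.foldl stepA (a::b::c::d::rest) = a'::b'::c'::d'::rest := by
  induction cmds with
  | nil => intro a b c d rest _; exact ⟨rfl, a, b, c, d, rfl⟩
  | cons cmd cmds ih =>
    intro a b c d rest h
    obtain ⟨hlen, hlo, hhi⟩ := h cmd (by simp)
    match cmd, hlen with
    | t :: f :: cr, _ =>
      simp only [List.headI] at hlo hhi
      obtain ⟨heq, a', b', c', d', hshape⟩ := step_eq a b c d rest t f cr hlo hhi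
      have h' : ∀ c ∈ cmds, 2 ≤ c.length ∧ 1 ≤ c.headI ∧ c.headI ≤ 4 :=
        fun c hc => h c (by simp [hc])
      obtain ⟨ih1, ih2⟩ := ih a' b' c' d' rest h'
      constructor
      · simp only [List.foldl_cons, heq.symm, hshape, ih1]
      · simp only [List.foldl_cons, hshape, ih2]

-- ===== VERDICT (by name: the statement is the Claim_ definition above) =====
theorem solution_spec : Claim_equal_solution := by
  intro k magnets commands _ hpre
  obtain ⟨hlen, _, hcmds, _⟩ := hpre
  unfold Spec_solution solution solution_alt
  match magnets, hlen with
  | a :: b :: c :: d :: rest, _ =>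
    obtain ⟨heq, _⟩ := fold_eq commands a b c d rest hcmds
    rw [heq, ans_eq]
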